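/-
  THE SEGMENTS OF compute_sorted_huffman (design/CONTRACTS.md entry 90, "Segments of compute_sorted_huffman"; units
  compute_sorted_huffman.1 … .4 and .COMPOSITION of design/units.tsv). The function's `Spec` is Vorbis/Spec/Codebook.lean's
  `compute_sorted_huffman.spec`; here: one assertion per cut point (`SortedHuffman.At…`) and one CLAIM per segment.

      .1  entry        → AtSort (L.….cut6 = 10B324H)        prologue, sparse dispatch, loop 1215 (dense, `k++`, CNT′) or loop 1220 (sparse)
      .2  AtSort       → AtLoop (cut9 = 10B3F8H)            qsort, the sentinel store, `len := sparse ? se : entries`, `i := 0`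
      .3  AtLoop       → AtEpilogue (cut12 = 10B551H)       loop 1233 with the binary search 1238 (BS) and the two store arms (ZV)
      .4  AtEpilogue   → Returned                           the epilogue
      COMPOSITION      Claim1 → Claim2 → Claim3 → Claim4 → the function's `Calls`

  Steady stack pointer: `e.rsp − 104` (six pushes, `sub rsp, 38H`). rbp = c throughout. Slots (spelled `e.rsp − n`, n = 104 − offset):
      [rsp+10H] = e.rsp − 88   lengths (qword)      stored by the prologue, read by loop 1215 and loop 1233
      [rsp+20H] = e.rsp − 72   values  (qword)      stored by the prologue, read by loop 1233 (sparse)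
      [rsp+18H] = e.rsp − 80   len     (dword)      stored by .2, read at the head of loop 1233
      [rsp+0CH] = e.rsp − 92   i       (dword)      stored by .2 (`:= 0`), loop 1233's counter
      [rsp+8], [rsp+1EH], [rsp+1FH], [rsp+28H] (code, the sparse byte, huff_len, 4·i): written before they are read in every round of
      loop 1233 — dead at every cut point between segments.
  At 10B324H every register but rbp (and rsp) is dead: .2 sets r12, rbx, r13 before it reads them. At 10B3F8H likewise.
-/
import Vorbis.Spec.Codebook
namespace Vorbis.Spec.SortedHuffman
open X86 X86.User Asan

/-- **What holds at the two inner cut points of compute_sorted_huffman** (entered at `e`; `c` = `e.rdi`, `lengths` = `e.rsi`,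
`values` = `e.rdx`): the frame facts, the precondition at the entry state, rbp = c and the two spilled arguments; and — in the
CURRENT memory — every field of `*c` reads as at the entry (`fields`: the stores went into the blocks, which are apart from the
struct), hence K1, K2, K3t, K4 (the sentinel word `sorted_values[−1]` is not written), ZV, and for a sparse book VAL (the
`values` block is not written). The constants `sorted_values`, `se`, `entries` of ZV / VAL are those of the ENTRY memory, as in
the function's postcondition. `sorted_codewords[0 .. se]` may hold anything. -/
structure Common (others : List Obj) (frames : List (Nat × FrameLayout)) (Blk : Block → Prop) (u₀ : State) (ret : Word)
    (e v : State) : Prop where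
  mid : Mid u₀ (compute_sorted_huffman.spec others frames Blk) L.compute_sorted_huffman.entry ret e (e.reg .rsp - 104) v
  pre : SortedHuffmanPre others frames Blk e
  /-- rbp = c -/
  c : v.reg .rbp = e.reg .rdi
  /-- `[rsp+10H]` = lengths -/
  lengths : UInt64.ofNat (v.mem.readLE (e.reg .rsp - 88) 8) = e.reg .rsi
  /-- `[rsp+20H]` = values -/
  values : UInt64.ofNat (v.mem.readLE (e.reg .rsp - 72) 8) = e.reg .rdx
  /-- no field of `*c` has changed -/
  fields : Codebook.SameFields e.mem v.mem (e.reg .rdi).toNat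
  K1 : Codebook.K1 v.mem (e.reg .rdi).toNat
  K2 : Codebook.K2 v.mem (e.reg .rdi).toNat
  K3t : Codebook.K3t Blk v.mem (e.reg .rdi).toNat
  K4 : Codebook.K4 Blk v.mem (e.reg .rdi).toNat
  /-- ZV in the current memory -/
  zv : ZV v.mem (Codebook.sorted_values e.mem (e.reg .rdi).toNat)
    (Codebook.sorted_entries e.mem (e.reg .rdi).toNat).toNat (Codebook.entries e.mem (e.reg .rdi).toNat)
  /-- sparse: VAL in the current memory -/
  vals : Codebook.sparse e.mem (e.reg .rdi).toNat ≠ 0 →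
    VAL v.mem (e.reg .rdx).toNat (Codebook.sorted_entries e.mem (e.reg .rdi).toNat).toNat
      (Codebook.entries e.mem (e.reg .rdi).toNat).toNat
  /-- the `lengths` array reads as at the entry (it is never written: dense it is `c.codeword_lengths`, whose only store site is
  the sparse arm; sparse it is the temp block) -/
  lens : (Block.mk (e.reg .rsi).toNat (Codebook.entries e.mem (e.reg .rdi).toNat).toNat).Kept e.mem v.mem

/-- **10B324H, before the qsort** (CONTRACTS: "rbp = c; [rsp+0x10] = lengths, [rsp+0x20] = values; full pre except
sorted_codewords[0..se) now arbitrary; all other registers dead"). -/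
structure AtSort (others : List Obj) (frames : List (Nat × FrameLayout)) (Blk : Block → Prop) (u₀ : State) (ret : Word)
    (e v : State) : Prop where
  rip : v.rip = L.compute_sorted_huffman.cut6
  common : Common others frames Blk u₀ ret e v

/-- **10B3F8H, the head of loop 1233 at its first arrival** (CONTRACTS: "rbp = c; [rsp+0xc] = i, 0 ≤ i ≤ len = [rsp+0x18];
[rsp+0x10] = lengths; [rsp+0x20] = values; ZV; pre blocks; sorted_codewords[0..se] arbitrary words") — with `i = 0`, as segment
.2 leaves it; the invariant for a general `i` is the worker's of segment .3. `len = N(c)` = `sparse ? se : entries`. -/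
structure AtLoop (others : List Obj) (frames : List (Nat × FrameLayout)) (Blk : Block → Prop) (u₀ : State) (ret : Word)
    (e v : State) : Prop where
  rip : v.rip = L.compute_sorted_huffman.cut9
  common : Common others frames Blk u₀ ret e v
  /-- `[rsp+18H]` = len, a dword -/
  len : v.mem.readLE (e.reg .rsp - 80) 4 = (Codebook.N e.mem (e.reg .rdi).toNat).toNat
  /-- `[rsp+0CH]` = i = 0, a dword -/
  i : v.mem.readLE (e.reg .rsp - 92) 4 = 0

/-- **10B551H, the epilogue** (CONTRACTS: "rsp steady; saved registers intact"), with the function's postcondition: ZV in the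
current memory. -/
structure AtEpilogue (others : List Obj) (frames : List (Nat × FrameLayout)) (Blk : Block → Prop) (u₀ : State) (ret : Word)
    (e v : State) : Prop where
  rip : v.rip = L.compute_sorted_huffman.cut12
  mid : Mid u₀ (compute_sorted_huffman.spec others frames Blk) L.compute_sorted_huffman.entry ret e (e.reg .rsp - 104) v
  zv : ZV v.mem (Codebook.sorted_values e.mem (e.reg .rdi).toNat)
    (Codebook.sorted_entries e.mem (e.reg .rdi).toNat).toNat (Codebook.entries e.mem (e.reg .rdi).toNat)

/-- **Segment .1** (10B1E0H – 10B322H; C lines 1207 – 1221; 78 instructions, 12 check sites): prologue (`rbp := c`, lengths and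
values spilled), the sparse dispatch, then loop 1215 (dense: `for (i=0; i < c->entries; ++i) if (include_in_sort(c, lengths[i]))
c->sorted_codewords[k++] = bit_reverse(c->codewords[i])`, `k = r14d = #{j < i : include}`; at the store entry `i` is included, so
`k ≤ se − 1` by CNT′; measure `entries − i`) or loop 1220 (sparse: `for (i=0; i < c->sorted_entries; ++i) c->sorted_codewords[i] =
bit_reverse(c->codewords[i])`; measure `se − i`). Both bounds are re-read from `*c` every round. Exit 10B324H from 10B22AH and from
the fall-through of 10B322H. Calls: include_in_sort, bit_reverse ×2. -/
def Claim1 (Lay : Layout) (μ : Microarch) (u₀ : State) : Prop :=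
  ∀ (others : List Obj) (frames : List (Nat × FrameLayout)) (Blk : Block → Prop) (ret : Word) (e : State),
    AtEntry (conv u₀) L.compute_sorted_huffman.entry (compute_sorted_huffman.spec others frames Blk).frame ret e →
    SortedHuffmanPre others frames Blk e →
    ReachVia Lay μ WayInv e (fun v => AtSort others frames Blk u₀ ret e v)

/-- **Segment .2** (10B324H – 10B3C4H; C lines 1224 – 1227; 35 instructions, 7 check sites): `qsort(c->sorted_codewords,
c->sorted_entries, 4, uint32_compare)` (rsi = sext(se), `se ≥ 1`; it touches only `[base, base + 4·se)`: record-preservation is not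
needed), the sentinel store `c->sorted_codewords[se] = 0xffffffff` (S4 at `sorted_codewords + 4·se`: the last word of the block),
`len := c->sparse ? c->sorted_entries : c->entries` into `[rsp+18H]`, `i := 0` into `[rsp+0CH]`. qsort's premise `CmpSpec … cmp 4` is
built from uint32_compare's contract (`CmpSpec.of_calls`, `cmp = L.uint32_compare.entry`). -/
def Claim2 (Lay : Layout) (μ : Microarch) (u₀ : State) : Prop :=
  ∀ (others : List Obj) (frames : List (Nat × FrameLayout)) (Blk : Block → Prop) (ret : Word) (e u : State),
    AtSort others frames Blk u₀ ret e u →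
    ReachVia Lay μ WayInv u (fun v => AtLoop others frames Blk u₀ ret e v)

/-- **Segment .3** (10B3C6H – 10B54CH, entered at the loop head 10B3F8H; C lines 1233 – 1254; 98 instructions, 13 check sites):
loop 1233 `for (i=0; i < len; ++i)` (inv `0 ≤ i ≤ len`, ZV, `*c` / lengths / values / codewords unchanged; measure `len − i`):
`huff_len = sparse ? lengths[values[i]] : lengths[i]` (VAL: `values[i] < entries`), `include_in_sort(c, huff_len)`,
`code = bit_reverse(c->codewords[i])`, the binary search 1238 over `sorted_codewords` (BS: `0 ≤ x`, `1 ≤ n`, `x + n ≤ se`; the probe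
`m = x + (n >> 1) < se`; measure `n`; exit `x < se`), then `sorted_values[x] = values[i]` and `codeword_lengths[x] = huff_len`
(sparse) or `sorted_values[x] = i` (dense, `i < len = entries`): both stored values are entry numbers, so ZV holds again. The
sparse byte `[rbp+1BH]` (10B406H) and `[rbp+840H]` (10B470H) are read UNCHECKED every round. -/
def Claim3 (Lay : Layout) (μ : Microarch) (u₀ : State) : Prop :=
  ∀ (others : List Obj) (frames : List (Nat × FrameLayout)) (Blk : Block → Prop) (ret : Word) (e u : State),
    AtLoop others frames Blk u₀ ret e u →
    ReachVia Lay μ WayInv u (fun v => AtEpilogue others frames Blk u₀ ret e v)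

/-- **Segment .4** (10B551H – 10B55FH; C line 1257; 8 instructions): `add rsp, 38H`, six pops, `ret`. -/
def Claim4 (Lay : Layout) (μ : Microarch) (u₀ : State) : Prop :=
  ∀ (others : List Obj) (frames : List (Nat × FrameLayout)) (Blk : Block → Prop) (ret : Word) (e u : State),
    AtEpilogue others frames Blk u₀ ret e u →
    ReachVia Lay μ WayInv u (Returned (conv u₀) (compute_sorted_huffman.spec others frames Blk) e ret)

end Vorbis.Spec.SortedHuffman
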